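-- pv_equiv track=rewrite | github.com/hsutingwei/momo_crawler | Model/data_loader.py | get_bucket_levels_jumped
-- ===== SOURCE A (Python) =====
-- SALES_BUCKETS = [0, 1, 5, 10, 20, 30, 50, 100, 500, 1000, 3000, 5000, 8000, 10000,
--                  30000, 50000, 100000, 150000, 200000, 300000, 400000, 500000, 1000000]
--
-- def get_bucket_levels_jumped(prev_sales: int, next_sales: int) -> int:
--     """
--     【未來可調整的接口】計算跳了幾級
--
--     可以用這個函數來定義「至少跳 N 級才算成長」，而不是用固定 delta
--
--     Args:
--         prev_sales: 前一個銷售級距值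
--         next_sales: 下一個銷售級距值
--
--     Returns:
--         跳躍的級數（例如：5→20 跳了 2 級，30→50 跳了 1 級）
--     """
--     if prev_sales >= next_sales:
--         return 0
--
--     prev_idx = None
--     next_idx = None
--     for i, bucket in enumerate(SALES_BUCKETS):
--         if prev_sales >= bucket:
--             prev_idx = i
--         if next_sales >= bucket:
--             next_idx = i
--
--     if prev_idx is None or next_idx is None:
--         return 0
--
--     return next_idx - prev_idx
-- ===== SOURCE B (Python) =====
-- SALES_BUCKETS = [0, 1, 5, 10, 20, 30, 50, 100, 500, 1000, 3000, 5000, 8000, 10000,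
--                  30000, 50000, 100000, 150000, 200000, 300000, 400000, 500000, 1000000]
--
-- def _bisect_right(value):
--     # hand-written bisect_right over the sorted threshold table
--     lo, hi = 0, len(SALES_BUCKETS)
--     while lo < hi:
--         mid = (lo + hi) // 2
--         if value < SALES_BUCKETS[mid]:
--             hi = mid
--         else:
--             lo = mid + 1
--     return lo
--
-- def get_bucket_levels_jumped(prev_sales: int, next_sales: int) -> int:
--     if prev_sales >= next_sales:
--         return 0
--     prev_idx = _bisect_right(prev_sales) - 1
--     next_idx = _bisect_right(next_sales) - 1
--     if prev_idx < 0 or next_idx < 0: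
--         return 0
--     return next_idx - prev_idx
-- ===== Notes on version B (the rewrite author's own statement) =====
-- stated objective: alternative
-- what changed: Replaces A's linear enumerate-scan that tracks the last threshold each value reaches with a hand-written binary search (bisect_right - 1) into the sorted bucket table, mapping index -1 to A's None case.
import Mathlib
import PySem

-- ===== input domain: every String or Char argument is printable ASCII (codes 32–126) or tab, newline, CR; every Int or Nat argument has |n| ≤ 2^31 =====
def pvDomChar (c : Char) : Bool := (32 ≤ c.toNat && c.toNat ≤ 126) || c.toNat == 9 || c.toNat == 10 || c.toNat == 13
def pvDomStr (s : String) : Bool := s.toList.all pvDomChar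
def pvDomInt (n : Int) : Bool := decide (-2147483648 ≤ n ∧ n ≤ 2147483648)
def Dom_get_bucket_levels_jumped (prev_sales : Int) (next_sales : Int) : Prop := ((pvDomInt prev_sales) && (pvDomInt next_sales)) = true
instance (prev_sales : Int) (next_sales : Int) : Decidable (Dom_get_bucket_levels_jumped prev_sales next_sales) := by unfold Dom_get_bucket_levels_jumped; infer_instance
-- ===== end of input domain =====

-- B replaces A's linear last-match scan over the bucket table by a hand-written binary search
-- (bisect_right - 1); alternative algorithm, same results.

def SALES_BUCKETS : List Int :=
  [0, 1, 5, 10, 20, 30, 50, 100, 500, 1000, 3000, 5000, 8000, 10000,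
   30000, 50000, 100000, 150000, 200000, 300000, 400000, 500000, 1000000]

-- ===== PORT A =====
-- literal port of A: early return, then one enumerate loop tracking the last
-- index each value reaches (Option = Python None), then the None guard.
def get_bucket_levels_jumped (prev_sales : Int) (next_sales : Int) : Int :=
  if prev_sales ≥ next_sales then 0
  else
    let st := (PySem.List.enumerate SALES_BUCKETS).foldl
      (fun (st : Option Int × Option Int) (ib : Int × Int) =>
        (if prev_sales ≥ ib.2 then some ib.1 else st.1,
         if next_sales ≥ ib.2 then some ib.1 else st.2))
      (none, none)
    match st.1, st.2 with
    | some pi, some ni => ni - pi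
    | _, _ => 0

-- ===== PORT B =====
-- hand-written bisect_right loop from Source B (while lo < hi: mid = (lo+hi)//2 …)
def bisectRightB (value : Int) (lo hi : Nat) : Nat :=
  if _h : lo < hi then
    let mid := (lo + hi) / 2
    if value < SALES_BUCKETS.getD mid 0 then bisectRightB value lo mid
    else bisectRightB value (mid + 1) hi
  else lo
termination_by hi - lo
decreasing_by all_goals omega

def get_bucket_levels_jumped_alt (prev_sales : Int) (next_sales : Int) : Int :=
  if prev_sales ≥ next_sales then 0
  else
    let prev_idx : Int := (bisectRightB prev_sales 0 SALES_BUCKETS.length : Int) - 1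
    let next_idx : Int := (bisectRightB next_sales 0 SALES_BUCKETS.length : Int) - 1
    if prev_idx < 0 ∨ next_idx < 0 then 0
    else next_idx - prev_idx

-- ===== PRECONDITION & SPEC =====
def Spec_get_bucket_levels_jumped (prev_sales : Int) (next_sales : Int) (out : Int) : Prop := out = get_bucket_levels_jumped_alt prev_sales next_sales
instance (prev_sales : Int) (next_sales : Int) (out : Int) : Decidable (Spec_get_bucket_levels_jumped prev_sales next_sales out) := by unfold Spec_get_bucket_levels_jumped; infer_instance

-- ===== CLAIM (what is proved, stated in full; the proofs are below) =====
def Claim_equal_get_bucket_levels_jumped : Prop := ∀ (prev_sales : Int) (next_sales : Int), Dom_get_bucket_levels_jumped prev_sales next_sales → Spec_get_bucket_levels_jumped prev_sales next_sales (get_bucket_levels_jumped prev_sales next_sales)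

-- ===== LEMMAS AND PROOFS =====

-- canonical bucket index: the last bucket a value reaches (none below bucket 0)
def chainIdx (x : Int) : Option Int :=
  if x ≥ 1000000 then some 22 else if x ≥ 500000 then some 21 else
  if x ≥ 400000 then some 20 else if x ≥ 300000 then some 19 else
  if x ≥ 200000 then some 18 else if x ≥ 150000 then some 17 else
  if x ≥ 100000 then some 16 else if x ≥ 50000 then some 15 else
  if x ≥ 30000 then some 14 else if x ≥ 10000 then some 13 else
  if x ≥ 8000 then some 12 else if x ≥ 5000 then some 11 else
  if x ≥ 3000 then some 10 else if x ≥ 1000 then some 9 else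
  if x ≥ 500 then some 8 else if x ≥ 100 then some 7 else
  if x ≥ 50 then some 6 else if x ≥ 30 then some 5 else
  if x ≥ 20 then some 4 else if x ≥ 10 then some 3 else
  if x ≥ 5 then some 2 else if x ≥ 1 then some 1 else
  if x ≥ 0 then some 0 else none

lemma loop_eq_chain (p n : Int) :
    (PySem.List.enumerate SALES_BUCKETS).foldl
      (fun (st : Option Int × Option Int) (ib : Int × Int) =>
        (if p ≥ ib.2 then some ib.1 else st.1,
         if n ≥ ib.2 then some ib.1 else st.2))
      (none, none) = (chainIdx p, chainIdx n) := by
  simp only [SALES_BUCKETS, PySem.List.enumerate, List.foldl, chainIdx]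
  norm_num

set_option maxHeartbeats 1000000 in
lemma bisect_eq_chain (x : Int) :
    ((bisectRightB x 0 SALES_BUCKETS.length : Nat) : Int) - 1 =
      (match chainIdx x with | none => -1 | some k => k) := by
  have hlen : SALES_BUCKETS.length = 23 := by norm_num [SALES_BUCKETS]
  rw [hlen]
  by_cases h0 : x < 0
  · -- None ≤ x < 0
    have hb : bisectRightB x 0 23 = 0 := by
      unfold bisectRightB bisectRightB bisectRightB bisectRightB bisectRightB bisectRightB
      norm_num [SALES_BUCKETS, (show x < 5000 by omega), (show x < 30 by omega), (show x < 5 by omega), (show x < 1 by omega), (show x < 0 by omega)]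
    rw [hb]; norm_num [chainIdx, (show ¬ x ≥ 1000000 by omega), (show ¬ x ≥ 500000 by omega), (show ¬ x ≥ 400000 by omega), (show ¬ x ≥ 300000 by omega), (show ¬ x ≥ 200000 by omega), (show ¬ x ≥ 150000 by omega), (show ¬ x ≥ 100000 by omega), (show ¬ x ≥ 50000 by omega), (show ¬ x ≥ 30000 by omega), (show ¬ x ≥ 10000 by omega), (show ¬ x ≥ 8000 by omega), (show ¬ x ≥ 5000 by omega), (show ¬ x ≥ 3000 by omega), (show ¬ x ≥ 1000 by omega), (show ¬ x ≥ 500 by omega), (show ¬ x ≥ 100 by omega), (show ¬ x ≥ 50 by omega), (show ¬ x ≥ 30 by omega), (show ¬ x ≥ 20 by omega), (show ¬ x ≥ 10 by omega), (show ¬ x ≥ 5 by omega), (show ¬ x ≥ 1 by omega), (show ¬ x ≥ 0 by omega)]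
  by_cases h1 : x < 1
  · -- None ≤ x < 1
    have hb : bisectRightB x 0 23 = 1 := by
      unfold bisectRightB bisectRightB bisectRightB bisectRightB bisectRightB bisectRightB
      norm_num [SALES_BUCKETS, (show x < 5000 by omega), (show x < 30 by omega), (show x < 5 by omega), (show x < 1 by omega), (show ¬ x < 0 by omega)]
    rw [hb]; norm_num [chainIdx, (show ¬ x ≥ 1000000 by omega), (show ¬ x ≥ 500000 by omega), (show ¬ x ≥ 400000 by omega), (show ¬ x ≥ 300000 by omega), (show ¬ x ≥ 200000 by omega), (show ¬ x ≥ 150000 by omega), (show ¬ x ≥ 100000 by omega), (show ¬ x ≥ 50000 by omega), (show ¬ x ≥ 30000 by omega), (show ¬ x ≥ 10000 by omega), (show ¬ x ≥ 8000 by omega), (show ¬ x ≥ 5000 by omega), (show ¬ x ≥ 3000 by omega), (show ¬ x ≥ 1000 by omega), (show ¬ x ≥ 500 by omega), (show ¬ x ≥ 100 by omega), (show ¬ x ≥ 50 by omega), (show ¬ x ≥ 30 by omega), (show ¬ x ≥ 20 by omega), (show ¬ x ≥ 10 by omega), (show ¬ x ≥ 5 by omega), (show ¬ x ≥ 1 by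 omega), (show x ≥ 0 by omega)]
  by_cases h5 : x < 5
  · -- None ≤ x < 5
    have hb : bisectRightB x 0 23 = 2 := by
      unfold bisectRightB bisectRightB bisectRightB bisectRightB bisectRightB bisectRightB
      norm_num [SALES_BUCKETS, (show x < 5000 by omega), (show x < 30 by omega), (show x < 5 by omega), (show ¬ x < 1 by omega)]
    rw [hb]; norm_num [chainIdx, (show ¬ x ≥ 1000000 by omega), (show ¬ x ≥ 500000 by omega), (show ¬ x ≥ 400000 by omega), (show ¬ x ≥ 300000 by omega), (show ¬ x ≥ 200000 by omega), (show ¬ x ≥ 150000 by omega), (show ¬ x ≥ 100000 by omega), (show ¬ x ≥ 50000 by omega), (show ¬ x ≥ 30000 by omega), (show ¬ x ≥ 10000 by omega), (show ¬ x ≥ 8000 by omega), (show ¬ x ≥ 5000 by omega), (show ¬ x ≥ 3000 by omega), (show ¬ x ≥ 1000 by omega), (show ¬ x ≥ 500 by omega), (show ¬ x ≥ 100 by omega), (show ¬ x ≥ 50 by omega), (show ¬ x ≥ 30 by omega), (show ¬ x ≥ 20 by omega), (show ¬ x ≥ 10 by omega), (show ¬ x ≥ 5 by omega), (show x ≥ 1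 by omega)]
  by_cases h10 : x < 10
  · -- None ≤ x < 10
    have hb : bisectRightB x 0 23 = 3 := by
      unfold bisectRightB bisectRightB bisectRightB bisectRightB bisectRightB bisectRightB
      norm_num [SALES_BUCKETS, (show x < 5000 by omega), (show x < 30 by omega), (show ¬ x < 5 by omega), (show x < 20 by omega), (show x < 10 by omega)]
    rw [hb]; norm_num [chainIdx, (show ¬ x ≥ 1000000 by omega), (show ¬ x ≥ 500000 by omega), (show ¬ x ≥ 400000 by omega), (show ¬ x ≥ 300000 by omega), (show ¬ x ≥ 200000 by omega), (show ¬ x ≥ 150000 by omega), (show ¬ x ≥ 100000 by omega), (show ¬ x ≥ 50000 by omega), (show ¬ x ≥ 30000 by omega), (show ¬ x ≥ 10000 by omega), (show ¬ x ≥ 8000 by omega), (show ¬ x ≥ 5000 by omega), (show ¬ x ≥ 3000 by omega), (show ¬ x ≥ 1000 by omega), (show ¬ x ≥ 500 by omega), (show ¬ x ≥ 100 by omega), (show ¬ x ≥ 50 by omega), (show ¬ x ≥ 30 by omega), (show ¬ x ≥ 20 by omega), (show ¬ x ≥ 10 by omega), (show x ≥ 5 by omega)]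
  by_cases h20 : x < 20
  · -- None ≤ x < 20
    have hb : bisectRightB x 0 23 = 4 := by
      unfold bisectRightB bisectRightB bisectRightB bisectRightB bisectRightB bisectRightB
      norm_num [SALES_BUCKETS, (show x < 5000 by omega), (show x < 30 by omega), (show ¬ x < 5 by omega), (show x < 20 by omega), (show ¬ x < 10 by omega)]
    rw [hb]; norm_num [chainIdx, (show ¬ x ≥ 1000000 by omega), (show ¬ x ≥ 500000 by omega), (show ¬ x ≥ 400000 by omega), (show ¬ x ≥ 300000 by omega), (show ¬ x ≥ 200000 by omega), (show ¬ x ≥ 150000 by omega), (show ¬ x ≥ 100000 by omega), (show ¬ x ≥ 50000 by omega), (show ¬ x ≥ 30000 by omega), (show ¬ x ≥ 10000 by omega), (show ¬ x ≥ 8000 by omega), (show ¬ x ≥ 5000 by omega), (show ¬ x ≥ 3000 by omega), (show ¬ x ≥ 1000 by omega), (show ¬ x ≥ 500 by omega), (show ¬ x ≥ 100 by omega), (show ¬ x ≥ 50 by omega), (show ¬ x ≥ 30 by omega), (show ¬ x ≥ 20 by omega), (show x ≥ 10 by omega)]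
  by_cases h30 : x < 30
  · -- None ≤ x < 30
    have hb : bisectRightB x 0 23 = 5 := by
      unfold bisectRightB bisectRightB bisectRightB bisectRightB bisectRightB bisectRightB
      norm_num [SALES_BUCKETS, (show x < 5000 by omega), (show x < 30 by omega), (show ¬ x < 5 by omega), (show ¬ x < 20 by omega)]
    rw [hb]; norm_num [chainIdx, (show ¬ x ≥ 1000000 by omega), (show ¬ x ≥ 500000 by omega), (show ¬ x ≥ 400000 by omega), (show ¬ x ≥ 300000 by omega), (show ¬ x ≥ 200000 by omega), (show ¬ x ≥ 150000 by omega), (show ¬ x ≥ 100000 by omega), (show ¬ x ≥ 50000 by omega), (show ¬ x ≥ 30000 by omega), (show ¬ x ≥ 10000 by omega), (show ¬ x ≥ 8000 by omega), (show ¬ x ≥ 5000 by omega), (show ¬ x ≥ 3000 by omega), (show ¬ x ≥ 1000 by omega), (show ¬ x ≥ 500 by omega), (show ¬ x ≥ 100 by omega), (show ¬ x ≥ 50 by omega), (show ¬ x ≥ 30 by omega), (show x ≥ 20 by omega)]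
  by_cases h50 : x < 50
  · -- None ≤ x < 50
    have hb : bisectRightB x 0 23 = 6 := by
      unfold bisectRightB bisectRightB bisectRightB bisectRightB bisectRightB bisectRightB
      norm_num [SALES_BUCKETS, (show x < 5000 by omega), (show ¬ x < 30 by omega), (show x < 500 by omega), (show x < 100 by omega), (show x < 50 by omega)]
    rw [hb]; norm_num [chainIdx, (show ¬ x ≥ 1000000 by omega), (show ¬ x ≥ 500000 by omega), (show ¬ x ≥ 400000 by omega), (show ¬ x ≥ 300000 by omega), (show ¬ x ≥ 200000 by omega), (show ¬ x ≥ 150000 by omega), (show ¬ x ≥ 100000 by omega), (show ¬ x ≥ 50000 by omega), (show ¬ x ≥ 30000 by omega), (show ¬ x ≥ 10000 by omega), (show ¬ x ≥ 8000 by omega), (show ¬ x ≥ 5000 by omega), (show ¬ x ≥ 3000 by omega), (show ¬ x ≥ 1000 by omega), (show ¬ x ≥ 500 by omega), (show ¬ x ≥ 100 by omega), (show ¬ x ≥ 50 by omega), (show x ≥ 30 by omega)]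
  by_cases h100 : x < 100
  · -- None ≤ x < 100
    have hb : bisectRightB x 0 23 = 7 := by
      unfold bisectRightB bisectRightB bisectRightB bisectRightB bisectRightB bisectRightB
      norm_num [SALES_BUCKETS, (show x < 5000 by omega), (show ¬ x < 30 by omega), (show x < 500 by omega), (show x < 100 by omega), (show ¬ x < 50 by omega)]
    rw [hb]; norm_num [chainIdx, (show ¬ x ≥ 1000000 by omega), (show ¬ x ≥ 500000 by omega), (show ¬ x ≥ 400000 by omega), (show ¬ x ≥ 300000 by omega), (show ¬ x ≥ 200000 by omega), (show ¬ x ≥ 150000 by omega), (show ¬ x ≥ 100000 by omega), (show ¬ x ≥ 50000 by omega), (show ¬ x ≥ 30000 by omega), (show ¬ x ≥ 10000 by omega), (show ¬ x ≥ 8000 by omega), (show ¬ x ≥ 5000 by omega), (show ¬ x ≥ 3000 by omega), (show ¬ x ≥ 1000 by omega), (show ¬ x ≥ 500 by omega), (show ¬ x ≥ 100 by omega), (show x ≥ 50 by omega)]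
  by_cases h500 : x < 500
  · -- None ≤ x < 500
    have hb : bisectRightB x 0 23 = 8 := by
      unfold bisectRightB bisectRightB bisectRightB bisectRightB bisectRightB bisectRightB
      norm_num [SALES_BUCKETS, (show x < 5000 by omega), (show ¬ x < 30 by omega), (show x < 500 by omega), (show ¬ x < 100 by omega)]
    rw [hb]; norm_num [chainIdx, (show ¬ x ≥ 1000000 by omega), (show ¬ x ≥ 500000 by omega), (show ¬ x ≥ 400000 by omega), (show ¬ x ≥ 300000 by omega), (show ¬ x ≥ 200000 by omega), (show ¬ x ≥ 150000 by omega), (show ¬ x ≥ 100000 by omega), (show ¬ x ≥ 50000 by omega), (show ¬ x ≥ 30000 by omega), (show ¬ x ≥ 10000 by omega), (show ¬ x ≥ 8000 by omega), (show ¬ x ≥ 5000 by omega), (show ¬ x ≥ 3000 by omega), (show ¬ x ≥ 1000 by omega), (show ¬ x ≥ 500 by omega), (show x ≥ 100 by omega)]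
  by_cases h1000 : x < 1000
  · -- None ≤ x < 1000
    have hb : bisectRightB x 0 23 = 9 := by
      unfold bisectRightB bisectRightB bisectRightB bisectRightB bisectRightB bisectRightB
      norm_num [SALES_BUCKETS, (show x < 5000 by omega), (show ¬ x < 30 by omega), (show ¬ x < 500 by omega), (show x < 3000 by omega), (show x < 1000 by omega)]
    rw [hb]; norm_num [chainIdx, (show ¬ x ≥ 1000000 by omega), (show ¬ x ≥ 500000 by omega), (show ¬ x ≥ 400000 by omega), (show ¬ x ≥ 300000 by omega), (show ¬ x ≥ 200000 by omega), (show ¬ x ≥ 150000 by omega), (show ¬ x ≥ 100000 by omega), (show ¬ x ≥ 50000 by omega), (show ¬ x ≥ 30000 by omega), (show ¬ x ≥ 10000 by omega), (show ¬ x ≥ 8000 by omega), (show ¬ x ≥ 5000 by omega), (show ¬ x ≥ 3000 by omega), (show ¬ x ≥ 1000 by omega), (show x ≥ 500 by omega)]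
  by_cases h3000 : x < 3000
  · -- None ≤ x < 3000
    have hb : bisectRightB x 0 23 = 10 := by
      unfold bisectRightB bisectRightB bisectRightB bisectRightB bisectRightB bisectRightB
      norm_num [SALES_BUCKETS, (show x < 5000 by omega), (show ¬ x < 30 by omega), (show ¬ x < 500 by omega), (show x < 3000 by omega), (show ¬ x < 1000 by omega)]
    rw [hb]; norm_num [chainIdx, (show ¬ x ≥ 1000000 by omega), (show ¬ x ≥ 500000 by omega), (show ¬ x ≥ 400000 by omega), (show ¬ x ≥ 300000 by omega), (show ¬ x ≥ 200000 by omega), (show ¬ x ≥ 150000 by omega), (show ¬ x ≥ 100000 by omega), (show ¬ x ≥ 50000 by omega), (show ¬ x ≥ 30000 by omega), (show ¬ x ≥ 10000 by omega), (show ¬ x ≥ 8000 by omega), (show ¬ x ≥ 5000 by omega), (show ¬ x ≥ 3000 by omega), (show x ≥ 1000 by omega)]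
  by_cases h5000 : x < 5000
  · -- None ≤ x < 5000
    have hb : bisectRightB x 0 23 = 11 := by
      unfold bisectRightB bisectRightB bisectRightB bisectRightB bisectRightB bisectRightB
      norm_num [SALES_BUCKETS, (show x < 5000 by omega), (show ¬ x < 30 by omega), (show ¬ x < 500 by omega), (show ¬ x < 3000 by omega)]
    rw [hb]; norm_num [chainIdx, (show ¬ x ≥ 1000000 by omega), (show ¬ x ≥ 500000 by omega), (show ¬ x ≥ 400000 by omega), (show ¬ x ≥ 300000 by omega), (show ¬ x ≥ 200000 by omega), (show ¬ x ≥ 150000 by omega), (show ¬ x ≥ 100000 by omega), (show ¬ x ≥ 50000 by omega), (show ¬ x ≥ 30000 by omega), (show ¬ x ≥ 10000 by omega), (show ¬ x ≥ 8000 by omega), (show ¬ x ≥ 5000 by omega), (show x ≥ 3000 by omega)]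
  by_cases h8000 : x < 8000
  · -- None ≤ x < 8000
    have hb : bisectRightB x 0 23 = 12 := by
      unfold bisectRightB bisectRightB bisectRightB bisectRightB bisectRightB bisectRightB
      norm_num [SALES_BUCKETS, (show ¬ x < 5000 by omega), (show x < 150000 by omega), (show x < 30000 by omega), (show x < 10000 by omega), (show x < 8000 by omega)]
    rw [hb]; norm_num [chainIdx, (show ¬ x ≥ 1000000 by omega), (show ¬ x ≥ 500000 by omega), (show ¬ x ≥ 400000 by omega), (show ¬ x ≥ 300000 by omega), (show ¬ x ≥ 200000 by omega), (show ¬ x ≥ 150000 by omega), (show ¬ x ≥ 100000 by omega), (show ¬ x ≥ 50000 by omega), (show ¬ x ≥ 30000 by omega), (show ¬ x ≥ 10000 by omega), (show ¬ x ≥ 8000 by omega), (show x ≥ 5000 by omega)]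
  by_cases h10000 : x < 10000
  · -- None ≤ x < 10000
    have hb : bisectRightB x 0 23 = 13 := by
      unfold bisectRightB bisectRightB bisectRightB bisectRightB bisectRightB bisectRightB
      norm_num [SALES_BUCKETS, (show ¬ x < 5000 by omega), (show x < 150000 by omega), (show x < 30000 by omega), (show x < 10000 by omega), (show ¬ x < 8000 by omega)]
    rw [hb]; norm_num [chainIdx, (show ¬ x ≥ 1000000 by omega), (show ¬ x ≥ 500000 by omega), (show ¬ x ≥ 400000 by omega), (show ¬ x ≥ 300000 by omega), (show ¬ x ≥ 200000 by omega), (show ¬ x ≥ 150000 by omega), (show ¬ x ≥ 100000 by omega), (show ¬ x ≥ 50000 by omega), (show ¬ x ≥ 30000 by omega), (show ¬ x ≥ 10000 by omega), (show x ≥ 8000 by omega)]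
  by_cases h30000 : x < 30000
  · -- None ≤ x < 30000
    have hb : bisectRightB x 0 23 = 14 := by
      unfold bisectRightB bisectRightB bisectRightB bisectRightB bisectRightB bisectRightB
      norm_num [SALES_BUCKETS, (show ¬ x < 5000 by omega), (show x < 150000 by omega), (show x < 30000 by omega), (show ¬ x < 10000 by omega)]
    rw [hb]; norm_num [chainIdx, (show ¬ x ≥ 1000000 by omega), (show ¬ x ≥ 500000 by omega), (show ¬ x ≥ 400000 by omega), (show ¬ x ≥ 300000 by omega), (show ¬ x ≥ 200000 by omega), (show ¬ x ≥ 150000 by omega), (show ¬ x ≥ 100000 by omega), (show ¬ x ≥ 50000 by omega), (show ¬ x ≥ 30000 by omega), (show x ≥ 10000 by omega)]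
  by_cases h50000 : x < 50000
  · -- None ≤ x < 50000
    have hb : bisectRightB x 0 23 = 15 := by
      unfold bisectRightB bisectRightB bisectRightB bisectRightB bisectRightB bisectRightB
      norm_num [SALES_BUCKETS, (show ¬ x < 5000 by omega), (show x < 150000 by omega), (show ¬ x < 30000 by omega), (show x < 100000 by omega), (show x < 50000 by omega)]
    rw [hb]; norm_num [chainIdx, (show ¬ x ≥ 1000000 by omega), (show ¬ x ≥ 500000 by omega), (show ¬ x ≥ 400000 by omega), (show ¬ x ≥ 300000 by omega), (show ¬ x ≥ 200000 by omega), (show ¬ x ≥ 150000 by omega), (show ¬ x ≥ 100000 by omega), (show ¬ x ≥ 50000 by omega), (show x ≥ 30000 by omega)]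
  by_cases h100000 : x < 100000
  · -- None ≤ x < 100000
    have hb : bisectRightB x 0 23 = 16 := by
      unfold bisectRightB bisectRightB bisectRightB bisectRightB bisectRightB bisectRightB
      norm_num [SALES_BUCKETS, (show ¬ x < 5000 by omega), (show x < 150000 by omega), (show ¬ x < 30000 by omega), (show x < 100000 by omega), (show ¬ x < 50000 by omega)]
    rw [hb]; norm_num [chainIdx, (show ¬ x ≥ 1000000 by omega), (show ¬ x ≥ 500000 by omega), (show ¬ x ≥ 400000 by omega), (show ¬ x ≥ 300000 by omega), (show ¬ x ≥ 200000 by omega), (show ¬ x ≥ 150000 by omega), (show ¬ x ≥ 100000 by omega), (show x ≥ 50000 by omega)]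
  by_cases h150000 : x < 150000
  · -- None ≤ x < 150000
    have hb : bisectRightB x 0 23 = 17 := by
      unfold bisectRightB bisectRightB bisectRightB bisectRightB bisectRightB bisectRightB
      norm_num [SALES_BUCKETS, (show ¬ x < 5000 by omega), (show x < 150000 by omega), (show ¬ x < 30000 by omega), (show ¬ x < 100000 by omega)]
    rw [hb]; norm_num [chainIdx, (show ¬ x ≥ 1000000 by omega), (show ¬ x ≥ 500000 by omega), (show ¬ x ≥ 400000 by omega), (show ¬ x ≥ 300000 by omega), (show ¬ x ≥ 200000 by omega), (show ¬ x ≥ 150000 by omega), (show x ≥ 100000 by omega)]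
  by_cases h200000 : x < 200000
  · -- None ≤ x < 200000
    have hb : bisectRightB x 0 23 = 18 := by
      unfold bisectRightB bisectRightB bisectRightB bisectRightB bisectRightB bisectRightB
      norm_num [SALES_BUCKETS, (show ¬ x < 5000 by omega), (show ¬ x < 150000 by omega), (show x < 400000 by omega), (show x < 300000 by omega), (show x < 200000 by omega)]
    rw [hb]; norm_num [chainIdx, (show ¬ x ≥ 1000000 by omega), (show ¬ x ≥ 500000 by omega), (show ¬ x ≥ 400000 by omega), (show ¬ x ≥ 300000 by omega), (show ¬ x ≥ 200000 by omega), (show x ≥ 150000 by omega)]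
  by_cases h300000 : x < 300000
  · -- None ≤ x < 300000
    have hb : bisectRightB x 0 23 = 19 := by
      unfold bisectRightB bisectRightB bisectRightB bisectRightB bisectRightB bisectRightB
      norm_num [SALES_BUCKETS, (show ¬ x < 5000 by omega), (show ¬ x < 150000 by omega), (show x < 400000 by omega), (show x < 300000 by omega), (show ¬ x < 200000 by omega)]
    rw [hb]; norm_num [chainIdx, (show ¬ x ≥ 1000000 by omega), (show ¬ x ≥ 500000 by omega), (show ¬ x ≥ 400000 by omega), (show ¬ x ≥ 300000 by omega), (show x ≥ 200000 by omega)]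
  by_cases h400000 : x < 400000
  · -- None ≤ x < 400000
    have hb : bisectRightB x 0 23 = 20 := by
      unfold bisectRightB bisectRightB bisectRightB bisectRightB bisectRightB bisectRightB
      norm_num [SALES_BUCKETS, (show ¬ x < 5000 by omega), (show ¬ x < 150000 by omega), (show x < 400000 by omega), (show ¬ x < 300000 by omega)]
    rw [hb]; norm_num [chainIdx, (show ¬ x ≥ 1000000 by omega), (show ¬ x ≥ 500000 by omega), (show ¬ x ≥ 400000 by omega), (show x ≥ 300000 by omega)]
  by_cases h500000 : x < 500000
  · -- None ≤ x < 500000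
    have hb : bisectRightB x 0 23 = 21 := by
      unfold bisectRightB bisectRightB bisectRightB bisectRightB bisectRightB bisectRightB
      norm_num [SALES_BUCKETS, (show ¬ x < 5000 by omega), (show ¬ x < 150000 by omega), (show ¬ x < 400000 by omega), (show x < 1000000 by omega), (show x < 500000 by omega)]
    rw [hb]; norm_num [chainIdx, (show ¬ x ≥ 1000000 by omega), (show ¬ x ≥ 500000 by omega), (show x ≥ 400000 by omega)]
  by_cases h1000000 : x < 1000000
  · -- None ≤ x < 1000000
    have hb : bisectRightB x 0 23 = 22 := by
      unfold bisectRightB bisectRightB bisectRightB bisectRightB bisectRightB bisectRightB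
      norm_num [SALES_BUCKETS, (show ¬ x < 5000 by omega), (show ¬ x < 150000 by omega), (show ¬ x < 400000 by omega), (show x < 1000000 by omega), (show ¬ x < 500000 by omega)]
    rw [hb]; norm_num [chainIdx, (show ¬ x ≥ 1000000 by omega), (show x ≥ 500000 by omega)]
  have hb : bisectRightB x 0 23 = 23 := by
    unfold bisectRightB bisectRightB bisectRightB bisectRightB bisectRightB bisectRightB
    norm_num [SALES_BUCKETS, (show ¬ x < 5000 by omega), (show ¬ x < 150000 by omega), (show ¬ x < 400000 by omega), (show ¬ x < 1000000 by omega)]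
  rw [hb]; norm_num [chainIdx, (show x ≥ 1000000 by omega)]


lemma chainIdx_some_nonneg {x k : Int} (h : chainIdx x = some k) : 0 ≤ k := by
  unfold chainIdx at h
  by_cases h1000000 : x ≥ 1000000
  · simp only [if_pos h1000000, Option.some.injEq] at h
    omega
  rw [if_neg h1000000] at h
  by_cases h500000 : x ≥ 500000
  · simp only [if_pos h500000, Option.some.injEq] at h
    omega
  rw [if_neg h500000] at h
  by_cases h400000 : x ≥ 400000
  · simp only [if_pos h400000, Option.some.injEq] at h
    omega
  rw [if_neg h400000] at h
  by_cases h300000 : x ≥ 300000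
  · simp only [if_pos h300000, Option.some.injEq] at h
    omega
  rw [if_neg h300000] at h
  by_cases h200000 : x ≥ 200000
  · simp only [if_pos h200000, Option.some.injEq] at h
    omega
  rw [if_neg h200000] at h
  by_cases h150000 : x ≥ 150000
  · simp only [if_pos h150000, Option.some.injEq] at h
    omega
  rw [if_neg h150000] at h
  by_cases h100000 : x ≥ 100000
  · simp only [if_pos h100000, Option.some.injEq] at h
    omega
  rw [if_neg h100000] at h
  by_cases h50000 : x ≥ 50000
  · simp only [if_pos h50000, Option.some.injEq] at h
    omega
  rw [if_neg h50000] at h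
  by_cases h30000 : x ≥ 30000
  · simp only [if_pos h30000, Option.some.injEq] at h
    omega
  rw [if_neg h30000] at h
  by_cases h10000 : x ≥ 10000
  · simp only [if_pos h10000, Option.some.injEq] at h
    omega
  rw [if_neg h10000] at h
  by_cases h8000 : x ≥ 8000
  · simp only [if_pos h8000, Option.some.injEq] at h
    omega
  rw [if_neg h8000] at h
  by_cases h5000 : x ≥ 5000
  · simp only [if_pos h5000, Option.some.injEq] at h
    omega
  rw [if_neg h5000] at h
  by_cases h3000 : x ≥ 3000
  · simp only [if_pos h3000, Option.some.injEq] at h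
    omega
  rw [if_neg h3000] at h
  by_cases h1000 : x ≥ 1000
  · simp only [if_pos h1000, Option.some.injEq] at h
    omega
  rw [if_neg h1000] at h
  by_cases h500 : x ≥ 500
  · simp only [if_pos h500, Option.some.injEq] at h
    omega
  rw [if_neg h500] at h
  by_cases h100 : x ≥ 100
  · simp only [if_pos h100, Option.some.injEq] at h
    omega
  rw [if_neg h100] at h
  by_cases h50 : x ≥ 50
  · simp only [if_pos h50, Option.some.injEq] at h
    omega
  rw [if_neg h50] at h
  by_cases h30 : x ≥ 30
  · simp only [if_pos h30, Option.some.injEq] at h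
    omega
  rw [if_neg h30] at h
  by_cases h20 : x ≥ 20
  · simp only [if_pos h20, Option.some.injEq] at h
    omega
  rw [if_neg h20] at h
  by_cases h10 : x ≥ 10
  · simp only [if_pos h10, Option.some.injEq] at h
    omega
  rw [if_neg h10] at h
  by_cases h5 : x ≥ 5
  · simp only [if_pos h5, Option.some.injEq] at h
    omega
  rw [if_neg h5] at h
  by_cases h1 : x ≥ 1
  · simp only [if_pos h1, Option.some.injEq] at h
    omega
  rw [if_neg h1] at h
  by_cases h0 : x ≥ 0
  · simp only [if_pos h0, Option.some.injEq] at h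
    omega
  rw [if_neg h0] at h
  exact absurd h (by simp)

-- ===== VERDICT (by name: the statement is the Claim_ definition above) =====
theorem get_bucket_levels_jumped_spec : Claim_equal_get_bucket_levels_jumped := by
  intro p n _
  unfold Spec_get_bucket_levels_jumped get_bucket_levels_jumped get_bucket_levels_jumped_alt
  by_cases h : p ≥ n
  · simp [h]
  · simp only [h, if_false]
    rw [loop_eq_chain, bisect_eq_chain, bisect_eq_chain]
    cases hp : chainIdx p with
    | none =>
      cases hn : chainIdx n with
      | none => simp
      | some kn => simp
    | some kp =>
      have hkp := chainIdx_some_nonneg hp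
      cases hn : chainIdx n with
      | none => simp
      | some kn =>
        have hkn := chainIdx_some_nonneg hn
        simp; omega
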